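-- pv_equiv track=rewrite | github.com/tirth1356/formatix | backend/agents/citation_engine.py | _find_reference_author_year
-- ===== SOURCE A (Python) =====
-- from typing import List, Dict, Any
--
-- def _find_reference_author_year(
--     last_name: str,
--     year: str,
--     references: List[str],
-- ) -> int | None:
--     """
--     Find index of the reference containing last_name and year.
--     """
--     for i, ref in enumerate(references):
--         ref_lower = ref.lower()
--         if last_name in ref_lower and year in ref:
--             return i
--     # Fuzzy: year only if author very short
--     if len(last_name) <= 3:
--         for i, ref in enumerate(references):
--             if year in ref:
--                 return i
--     return None
-- ===== SOURCE B (Python) =====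
-- def _find_reference_author_year(last_name, year, references):
--     first_full = None
--     first_year = None
--     for i, ref in enumerate(references):
--         ref_lower = ref.lower()
--         if first_full is None and last_name in ref_lower and year in ref:
--             first_full = i
--         if first_year is None and year in ref:
--             first_year = i
--     if first_full is not None:
--         return first_full
--     if len(last_name) <= 3:
--         return first_year
--     return None
-- ===== Notes on version B (the rewrite author's own statement) =====
-- stated objective: alternative
-- what changed: Replaces A's two sequential conditional scans (full match first, then a year-only rescan for short names) with a single pass that records both first-candidate indices and decides after the loop.
import Mathlib
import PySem

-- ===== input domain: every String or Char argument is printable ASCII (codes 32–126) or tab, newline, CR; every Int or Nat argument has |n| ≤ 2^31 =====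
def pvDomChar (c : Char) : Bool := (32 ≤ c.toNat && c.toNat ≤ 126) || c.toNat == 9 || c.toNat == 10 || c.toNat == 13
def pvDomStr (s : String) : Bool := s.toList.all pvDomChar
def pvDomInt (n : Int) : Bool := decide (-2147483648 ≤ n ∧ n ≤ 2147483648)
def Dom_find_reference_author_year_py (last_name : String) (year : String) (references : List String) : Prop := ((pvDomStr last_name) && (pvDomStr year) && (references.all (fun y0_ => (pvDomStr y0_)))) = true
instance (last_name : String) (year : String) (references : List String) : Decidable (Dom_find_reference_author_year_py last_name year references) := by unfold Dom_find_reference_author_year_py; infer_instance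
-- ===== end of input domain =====

-- B replaces A's two sequential conditional scans with ONE pass recording both first-candidate
-- indices (full match; year-only) and a post-loop decision; same asymptotic cost (objective: alternative).

-- ===== PORT A =====
-- first loop: return first i with last_name in ref.lower() and year in ref
def pvALoop1 (last_name year : String) : List String → Int → Option Int
  | [], _ => none
  | ref :: rest, i =>
    if PySem.Str.isIn last_name (PySem.Str.lower ref) && PySem.Str.isIn year ref then some i
    else pvALoop1 last_name year rest (i + 1)

-- fuzzy loop: return first i with year in ref
def pvALoop2 (year : String) : List String → Int → Option Int
  | [], _ => none
  | ref :: rest, i =>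
    if PySem.Str.isIn year ref then some i
    else pvALoop2 year rest (i + 1)

def find_reference_author_year_py (last_name : String) (year : String) (references : List String) : Option Int :=
  match pvALoop1 last_name year references 0 with
  | some i => some i
  | none =>
    if PySem.Str.len last_name ≤ 3 then pvALoop2 year references 0
    else none

-- ===== PORT B =====
-- one fold step over enumerate(references), maintaining (first_full, first_year)
def pvBStep (last_name year : String) (st : Option Int × Option Int) (p : Int × String) :
    Option Int × Option Int :=
  let ref_lower := PySem.Str.lower p.2
  let first_full :=
    if st.1.isNone && PySem.Str.isIn last_name ref_lower && PySem.Str.isIn year p.2 then some p.1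
    else st.1
  let first_year :=
    if st.2.isNone && PySem.Str.isIn year p.2 then some p.1 else st.2
  (first_full, first_year)

def find_reference_author_year_py_alt (last_name : String) (year : String) (references : List String) : Option Int :=
  let st := (PySem.List.enumerate references).foldl (pvBStep last_name year) (none, none)
  match st.1 with
  | some i => some i
  | none =>
    if PySem.Str.len last_name ≤ 3 then st.2
    else none

-- ===== PRECONDITION & SPEC =====
def Spec_find_reference_author_year_py (last_name : String) (year : String) (references : List String) (out : Option Int) : Prop := out = find_reference_author_year_py_alt last_name year references
instance (last_name : String) (year : String) (references : List String) (out : Option Int) : Decidable (Spec_find_reference_author_year_py last_name year references out) := by unfold Spec_find_reference_author_year_py; infer_instance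

-- ===== CLAIM (what is proved, stated in full; the proofs are below) =====
def Claim_equal_find_reference_author_year_py : Prop := ∀ (last_name : String) (year : String) (references : List String), Dom_find_reference_author_year_py last_name year references → Spec_find_reference_author_year_py last_name year references (find_reference_author_year_py last_name year references)

-- ===== LEMMAS AND PROOFS =====

-- the fold computes exactly the two first-hit scans, whatever state it starts from
theorem pvFold_eq (last_name year : String) (refs : List String) :
    ∀ (i : Int) (ff fy : Option Int),
      (PySem.List.enumerate refs i).foldl (pvBStep last_name year) (ff, fy) =
        ((match ff with | some k => some k | none => pvALoop1 last_name year refs i),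
         (match fy with | some k => some k | none => pvALoop2 year refs i)) := by
  induction refs with
  | nil =>
    intro i ff fy
    simp [PySem.List.enumerate_nil, pvALoop1, pvALoop2]
    constructor <;> (cases ff <;> cases fy <;> rfl)
  | cons r rest ih =>
    intro i ff fy
    rw [PySem.List.enumerate_cons, List.foldl_cons]
    show (PySem.List.enumerate rest (i + 1)).foldl (pvBStep last_name year)
        (pvBStep last_name year (ff, fy) (i, r)) = _
    cases ff <;> cases fy <;>
      simp only [pvBStep, pvALoop1, pvALoop2, Option.isNone_some, Option.isNone_none] <;>
      split_ifs <;> simp_all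

-- ===== VERDICT (by name: the statement is the Claim_ definition above) =====
theorem find_reference_author_year_py_spec : Claim_equal_find_reference_author_year_py := by
  intro last_name year references _
  show find_reference_author_year_py last_name year references =
    find_reference_author_year_py_alt last_name year references
  unfold find_reference_author_year_py find_reference_author_year_py_alt
  rw [show PySem.List.enumerate references = PySem.List.enumerate references 0 from rfl,
    pvFold_eq]
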